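-- pv_equiv track=rewrite | github.com/aphp/edspdf | edspdf/pipes/embeddings/simple_text_embedding.py | word_shape
-- ===== SOURCE A (Python) =====
-- def word_shape(text: str) -> str:
--     """
--     Converts a word into its shape following the algorithm used in the
--     spaCy library.
--
--     https://github.com/explosion/spaCy/blob/b69d249a/spacy/lang/lex_attrs.py#L118
--
--     Parameters
--     ----------
--     text: str
--
--     Returns
--     -------
--     str
--     The word shape
--     """
--     if len(text) >= 100:
--         return "LONG"
--
--     shape = []
--     last = ""
--     seq = 0
--     for char in text:
--         if char.isalpha():
--             if char.isupper():
--                 shape_char = "X"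
--             else:
--                 shape_char = "x"
--         elif char.isdigit():
--             shape_char = "d"
--         else:
--             shape_char = char
--         if shape_char == last:
--             seq += 1
--         else:
--             seq = 0
--             last = shape_char
--         if seq < 4:
--             shape.append(shape_char)
--     return "".join(shape)
-- ===== SOURCE B (Python) =====
-- def _sym(c):
--     if c.isalpha():
--         return "X" if c.isupper() else "x"
--     if c.isdigit():
--         return "d"
--     return c
--
--
-- def word_shape(text: str) -> str:
--     if len(text) >= 100:
--         return "LONG"
--     syms = [_sym(c) for c in text]
--     shape = []
--     rest = syms
--     while rest:
--         a, i = rest[0], 1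
--         while i < len(rest) and rest[i] == a:
--             i += 1
--         shape += rest[:i][:4]
--         rest = rest[i:]
--     return "".join(shape)
-- ===== Notes on version B (the rewrite author's own statement) =====
-- stated objective: simpler
-- what changed: Replaces A's per-character last/seq state machine with a map of every character to its shape symbol followed by a run-splitting scan that keeps at most the first 4 symbols of each maximal run.
import Mathlib
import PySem

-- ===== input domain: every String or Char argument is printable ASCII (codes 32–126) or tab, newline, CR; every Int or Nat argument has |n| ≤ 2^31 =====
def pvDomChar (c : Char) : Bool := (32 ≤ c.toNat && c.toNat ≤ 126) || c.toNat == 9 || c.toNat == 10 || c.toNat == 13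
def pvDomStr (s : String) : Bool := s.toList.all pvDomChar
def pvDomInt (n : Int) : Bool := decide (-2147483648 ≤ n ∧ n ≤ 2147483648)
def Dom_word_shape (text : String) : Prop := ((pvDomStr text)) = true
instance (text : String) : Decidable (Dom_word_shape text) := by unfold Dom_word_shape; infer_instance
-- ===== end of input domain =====

-- B replaces A's per-character last/seq state machine by a map-to-symbols pass followed by a
-- run-splitting scan taking at most 4 symbols per maximal run (simpler decomposition, same cost).

-- ===== PORT A =====
-- Python's c.isalpha()/isupper()/isdigit(), exact on the printable-ASCII input domain.
def shapeChar (c : Char) : Char :=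
  if ('A' ≤ c ∧ c ≤ 'Z') ∨ ('a' ≤ c ∧ c ≤ 'z') then
    if 'A' ≤ c ∧ c ≤ 'Z' then 'X' else 'x'
  else if '0' ≤ c ∧ c ≤ '9' then 'd'
  else c

-- A's loop: state (last, seq); `last = ""` is `none` (shape_char is always a single char here).
def goA : List Char → Option Char → Nat → List Char
  | [], _, _ => []
  | c :: cs, last, seq =>
    let sc := shapeChar c
    if some sc == last then
      if seq + 1 < 4 then sc :: goA cs last (seq + 1) else goA cs last (seq + 1)
    else
      sc :: goA cs (some sc) 0

def word_shape (text : String) : String :=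
  if 100 ≤ text.toList.length then "LONG" else String.ofList (goA text.toList none 0)

-- ===== PORT B =====
-- inner while loop of Source B: split off the maximal run equal to `a` (rest[:i], rest[i:])
def takeRun (a : Char) : List Char → List Char × List Char
  | [] => ([], [])
  | b :: bs => if b == a then let p := takeRun a bs; (b :: p.1, p.2) else ([], b :: bs)

theorem takeRun_snd_length (a : Char) : ∀ l : List Char, (takeRun a l).2.length ≤ l.length := by
  intro l
  induction l with
  | nil => simp [takeRun]
  | cons b bs ih =>
    simp only [takeRun]
    split
    · simpa using Nat.le_succ_of_le ih
    · simp

-- outer while loop of Source B, gathering `rest[:i][:4]` chunks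
def runsB : List Char → List (List Char)
  | [] => []
  | a :: as => (a :: (takeRun a as).1) :: runsB (takeRun a as).2
termination_by l => l.length
decreasing_by
  have := takeRun_snd_length a as
  simp
  omega

def word_shape_alt (text : String) : String :=
  if 100 ≤ text.toList.length then "LONG"
  else String.ofList (((runsB (text.toList.map shapeChar)).map (fun r => r.take 4)).flatten)

-- ===== PRECONDITION & SPEC =====
def Spec_word_shape (text : String) (out : String) : Prop := out = word_shape_alt text
instance (text : String) (out : String) : Decidable (Spec_word_shape text out) := by unfold Spec_word_shape; infer_instance

-- ===== CLAIM (what is proved, stated in full; the proofs are below) =====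
def Claim_equal_word_shape : Prop := ∀ (text : String), Dom_word_shape text → Spec_word_shape text (word_shape text)

-- ===== LEMMAS AND PROOFS =====

-- A's loop acting directly on shape symbols
def goM : List Char → Option Char → Nat → List Char
  | [], _, _ => []
  | s :: ss, last, seq =>
    if some s == last then
      if seq + 1 < 4 then s :: goM ss last (seq + 1) else goM ss last (seq + 1)
    else
      s :: goM ss (some s) 0

theorem goA_eq_goM : ∀ (l : List Char) (last : Option Char) (seq : Nat),
    goA l last seq = goM (l.map shapeChar) last seq := by
  intro l
  induction l with
  | nil => intro last seq; rfl
  | cons c cs ih =>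
    intro last seq
    simp only [goA, goM, List.map_cons]
    split
    · split <;> simp [ih]
    · simp [ih]

theorem goM_run : ∀ (l : List Char) (a : Char) (k : Nat),
    goM l (some a) k = (takeRun a l).1.take (3 - k) ++ goM (takeRun a l).2 none 0 := by
  intro l
  induction l with
  | nil => intro a k; simp [goM, takeRun]
  | cons b bs ih =>
    intro a k
    by_cases hb : b = a
    · subst hb
      have h := ih b (k + 1)
      by_cases hk : k + 1 < 4
      · have h3 : 3 - k = (3 - (k + 1)) + 1 := by omega
        simp [goM, takeRun, hk, h, h3]
      · have h1 : 3 - k = 0 := by omega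
        have h2 : 3 - (k + 1) = 0 := by omega
        simp [goM, takeRun, hk, h, h1, h2]
    · have hba : (b == a) = false := by simp [hb]
      simp [goM, takeRun, hba]

theorem goM_eq_runs : ∀ (l : List Char),
    goM l none 0 = ((runsB l).map (fun r => r.take 4)).flatten := by
  intro l
  induction hl : l.length using Nat.strong_induction_on generalizing l with
  | _ n ih =>
    cases l with
    | nil => simp [goM, runsB]
    | cons a as =>
      simp only [goM, runsB, List.map_cons, List.flatten_cons]
      rw [if_neg (by simp), goM_run]
      have hlen : (takeRun a as).2.length < n := by
        have := takeRun_snd_length a as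
        simp at hl
        omega
      rw [ih _ hlen _ rfl]
      simp

-- ===== VERDICT (by name: the statement is the Claim_ definition above) =====
theorem word_shape_spec : Claim_equal_word_shape := by
  intro text _
  unfold Spec_word_shape word_shape word_shape_alt
  split
  · rfl
  · rw [goA_eq_goM, goM_eq_runs]
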